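-- pv_equiv track=rewrite | github.com/bqqd03/English | English_flask/app/teacher/views.py | split_punctuation
-- ===== SOURCE A (Python) =====
-- import string
--
-- def split_punctuation(sentence):
--     words = sentence.split()
--     punctuation_string = string.punctuation
--     # 删掉标点符号
--     for word in range(len(words)):
--         for j in punctuation_string:
--             words[word] = words[word].replace(j, '').lower()
--     word_list = [word for word in words if any(char.isalpha() for char in word)]
--     return word_list
-- ===== SOURCE B (Python) =====
-- def _is_punct(c):
--     o = ord(c)
--     return 33 <= o <= 47 or 58 <= o <= 64 or 91 <= o <= 96 or 123 <= o <= 126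
--
-- def _clean(word):
--     # one pass: drop punctuation, lowercase kept characters
--     out = []
--     for c in word:
--         if not _is_punct(c):
--             out.append(c.lower())
--     return ''.join(out)
--
-- def _has_letter(w):
--     return any('a' <= c <= 'z' for c in w)
--
-- def split_punctuation(sentence):
--     result = []
--     for word in sentence.split():
--         cw = _clean(word)
--         if _has_letter(cw):
--             result.append(cw)
--     return result
-- ===== Notes on version B (the rewrite author's own statement) =====
-- stated objective: simpler
-- what changed: A rewrites each word 32 times (a str.replace pass plus a re-lowering per punctuation character, then a separate filtering comprehension); B makes one per-character pass per word that drops punctuation by an arithmetic ASCII-range test and lowercases as it goes, and keeps words containing a lowercase letter in the same single loop.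
import Mathlib
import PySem

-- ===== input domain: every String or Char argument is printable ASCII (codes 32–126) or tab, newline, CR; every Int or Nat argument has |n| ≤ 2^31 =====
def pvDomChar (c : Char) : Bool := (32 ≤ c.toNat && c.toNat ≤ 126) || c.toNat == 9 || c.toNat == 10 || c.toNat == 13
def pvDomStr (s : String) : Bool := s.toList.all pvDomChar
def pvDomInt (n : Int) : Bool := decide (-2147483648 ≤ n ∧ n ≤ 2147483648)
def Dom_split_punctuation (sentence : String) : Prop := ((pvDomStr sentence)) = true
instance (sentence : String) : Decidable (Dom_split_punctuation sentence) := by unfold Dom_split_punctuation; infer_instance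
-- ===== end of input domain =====

-- B replaces A's nested word×32-punctuation replace/re-lower loops with one per-character pass
-- per word: punctuation is recognised by an arithmetic ASCII-range test, kept characters are
-- lowercased on the fly, and kept words are collected in the same single loop (objective: simpler).

-- ===== PORT A =====
-- string.punctuation, as A reads it
def pvPunctA : List Char := ['!', '"', '#', '$', '%', '&', '\'', '(', ')', '*', '+', ',', '-', '.', '/', ':', ';', '<', '=', '>', '?', '@', '[', '\\', ']', '^', '_', '`', '{', '|', '}', '~']

def split_punctuation (sentence : String) : List String :=
  let words := PySem.Str.split₀ sentence
  -- for word in range(len(words)): for j in punct: words[word] = words[word].replace(j,'').lower()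
  -- (the index loop rewrites each list slot independently: transcribed as a map over the slots)
  let words := words.map (fun w =>
    pvPunctA.foldl (fun w j => PySem.Str.lower (PySem.Str.replace w (String.ofList [j]) "")) w)
  words.filter (fun w => w.toList.any (fun ch => PySem.Chars.isalpha ch))

-- ===== PORT B =====
-- 33 <= ord(c) <= 47 or 58 <= ord(c) <= 64 or 91 <= ord(c) <= 96 or 123 <= ord(c) <= 126
def pvIsPunct (c : Char) : Bool :=
  (33 ≤ c.toNat && c.toNat ≤ 47) || (58 ≤ c.toNat && c.toNat ≤ 64) ||
  (91 ≤ c.toNat && c.toNat ≤ 96) || (123 ≤ c.toNat && c.toNat ≤ 126)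

-- _clean's loop over the characters (c.lower() on one char = PySem.Chars.lowerChar, exact on ASCII)
def pvClean : List Char → List Char
  | [] => []
  | c :: t => if pvIsPunct c then pvClean t else PySem.Chars.lowerChar c :: pvClean t

-- any('a' <= c <= 'z' for c in w)
def pvHasLetter : List Char → Bool
  | [] => false
  | c :: t => (decide ('a' ≤ c) && decide (c ≤ 'z')) || pvHasLetter t

-- the main loop over the words, appending kept cleaned words in order
def pvBuild : List String → List String
  | [] => []
  | w :: ws =>
    let cw := String.ofList (pvClean w.toList)
    if pvHasLetter cw.toList then cw :: pvBuild ws else pvBuild ws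

def split_punctuation_alt (sentence : String) : List String :=
  pvBuild (PySem.Str.split₀ sentence)

-- ===== PRECONDITION & SPEC =====
def Spec_split_punctuation (sentence : String) (out : List String) : Prop := out = split_punctuation_alt sentence
instance (sentence : String) (out : List String) : Decidable (Spec_split_punctuation sentence out) := by unfold Spec_split_punctuation; infer_instance

-- ===== CLAIM (what is proved, stated in full; the proofs are below) =====
def Claim_equal_split_punctuation : Prop := ∀ (sentence : String), Dom_split_punctuation sentence → Spec_split_punctuation sentence (split_punctuation sentence)

-- ===== LEMMAS AND PROOFS =====

lemma replace_go_single (j : Char) (fuel : Nat) : ∀ (l acc : List Char), l.length ≤ fuel →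
    PySem.Chars.replace.go [j] [] fuel l acc = acc.reverse ++ l.filter (fun c => !(c == j)) := by
  induction fuel with
  | zero => intro l acc h; have : l = [] := by simpa using h
            subst this; simp [PySem.Chars.replace.go]
  | succ n ih =>
    intro l acc h
    cases l with
    | nil => simp [PySem.Chars.replace.go]
    | cons c t =>
      rw [PySem.Chars.replace.go]
      by_cases hc : c = j
      · subst hc
        have hpre : [c].isPrefixOf (c :: t) = true := by simp [List.isPrefixOf]
        rw [if_pos hpre]
        simp only [List.length, List.drop, List.reverse_nil, List.nil_append]
        rw [ih t acc (by simpa using h)]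
        simp
      · have hpre : [j].isPrefixOf (c :: t) = false := by
          simp [List.isPrefixOf]; exact fun hh => hc hh.symm
        rw [if_neg (by simp [hpre])]
        rw [ih t (c :: acc) (by simpa using Nat.le_of_succ_le_succ h)]
        simp [hc]

lemma replace_single (l : List Char) (j : Char) :
    PySem.Chars.replace l [j] [] = l.filter (fun c => !(c == j)) := by
  rw [PySem.Chars.replace]
  simp only [List.isEmpty]
  exact replace_go_single j l.length l [] le_rfl

lemma lowerChar_of_upper (c : Char) (h : PySem.Chars.isupper c = true) :
    65 ≤ c.toNat ∧ c.toNat ≤ 90 ∧ (PySem.Chars.lowerChar c).toNat = c.toNat + 32 := by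
  simp [PySem.Chars.isupper] at h
  obtain ⟨h1, h2⟩ := h
  have h1' : 65 ≤ c.toNat := by exact_mod_cast Char.le_def.mp h1
  have h2' : c.toNat ≤ 90 := by exact_mod_cast Char.le_def.mp h2
  refine ⟨h1', h2', ?_⟩
  simp [PySem.Chars.lowerChar, PySem.Chars.isupper, h1, h2]
  rw [Char.toNat_ofNat, if_pos (by left; omega)]

lemma toNat_le_iff (c d : Char) : c ≤ d ↔ c.toNat ≤ d.toNat := by
  rw [Char.le_def, UInt32.le_iff_toNat_le]; rfl

lemma islower_lowerChar_of_upper (c : Char) (hu : PySem.Chars.isupper c = true) :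
    PySem.Chars.islower (PySem.Chars.lowerChar c) = true := by
  obtain ⟨h1, h2, h3⟩ := lowerChar_of_upper c hu
  have ha : ('a' : Char).toNat = 97 := by decide
  have hz : ('z' : Char).toNat = 122 := by decide
  simp only [PySem.Chars.islower, Bool.and_eq_true, decide_eq_true_eq]
  rw [toNat_le_iff, toNat_le_iff, ha, hz, h3]
  omega

lemma lowerChar_nonalpha_iff (c j : Char) (hj : PySem.Chars.isalpha j = false) :
    (PySem.Chars.lowerChar c == j) = (c == j) := by
  simp only [PySem.Chars.isalpha, Bool.or_eq_false_iff] at hj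
  by_cases hu : PySem.Chars.isupper c = true
  · have hlow := islower_lowerChar_of_upper c hu
    have hne1 : PySem.Chars.lowerChar c ≠ j := fun h => by rw [h] at hlow; rw [hlow] at hj; simp at hj
    have hne2 : c ≠ j := fun h => by rw [h] at hu; rw [hu] at hj; simp at hj
    simp [hne1, hne2]
  · simp [PySem.Chars.lowerChar, hu]

lemma lowerChar_idem (c : Char) :
    PySem.Chars.lowerChar (PySem.Chars.lowerChar c) = PySem.Chars.lowerChar c := by
  by_cases hu : PySem.Chars.isupper c = true
  · have hlow := islower_lowerChar_of_upper c hu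
    have hnu : PySem.Chars.isupper (PySem.Chars.lowerChar c) = false := by
      simp only [PySem.Chars.islower, Bool.and_eq_true, decide_eq_true_eq] at hlow
      simp only [PySem.Chars.isupper, Bool.and_eq_false_iff, decide_eq_false_iff_not]
      right
      intro hZ
      have := (toNat_le_iff _ _).mp hlow.1
      have := (toNat_le_iff _ _).mp hZ
      have ha : ('a' : Char).toNat = 97 := by decide
      have hZ' : ('Z' : Char).toNat = 90 := by decide
      omega
    conv_lhs => rw [PySem.Chars.lowerChar]
    simp [hnu]
  · conv_lhs => rw [show PySem.Chars.lowerChar c = c by simp [PySem.Chars.lowerChar, hu]]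

lemma lower_idem (w : List Char) :
    PySem.Chars.lower (PySem.Chars.lower w) = PySem.Chars.lower w := by
  simp [PySem.Chars.lower, List.map_map, Function.comp_def, lowerChar_idem]

lemma lower_filter_comm (w : List Char) (j : Char) (hj : PySem.Chars.isalpha j = false) :
    (PySem.Chars.lower w).filter (fun c => !(c == j))
      = PySem.Chars.lower (w.filter (fun c => !(c == j))) := by
  simp only [PySem.Chars.lower, List.filter_map, Function.comp_def]
  congr 1
  apply List.filter_congr
  intro c _
  rw [lowerChar_nonalpha_iff c j hj]

-- list-level image of A's inner punctuation loop
def pvListFold (ps : List Char) (l : List Char) : List Char :=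
  ps.foldl (fun l j => PySem.Chars.lower (l.filter (fun c => !(c == j)))) l

lemma pvListFold_lower (ps : List Char) (hps : ∀ j ∈ ps, PySem.Chars.isalpha j = false) :
    ∀ l, pvListFold ps (PySem.Chars.lower l)
      = PySem.Chars.lower (l.filter (fun c => !ps.contains c)) := by
  induction ps with
  | nil => intro l; simp [pvListFold]
  | cons j t ih =>
    intro l
    have hj : PySem.Chars.isalpha j = false := hps j (by simp)
    have ht : ∀ x ∈ t, PySem.Chars.isalpha x = false := fun x hx => hps x (by simp [hx])
    show pvListFold t (PySem.Chars.lower ((PySem.Chars.lower l).filter (fun c => !(c == j))))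
      = _
    rw [lower_filter_comm l j hj, lower_idem, ih ht]
    rw [List.filter_filter]
    congr 1
    apply List.filter_congr
    intro c _
    by_cases hcj : c = j <;> simp [hcj, Bool.and_comm]

lemma pvListFold_eq (ps : List Char) (hne : ps ≠ []) (hps : ∀ j ∈ ps, PySem.Chars.isalpha j = false)
    (l : List Char) :
    pvListFold ps l = PySem.Chars.lower (l.filter (fun c => !ps.contains c)) := by
  cases ps with
  | nil => exact absurd rfl hne
  | cons j t =>
    have hj : PySem.Chars.isalpha j = false := hps j (by simp)
    have ht : ∀ x ∈ t, PySem.Chars.isalpha x = false := fun x hx => hps x (by simp [hx])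
    show pvListFold t (PySem.Chars.lower (l.filter (fun c => !(c == j)))) = _
    rw [pvListFold_lower t ht, List.filter_filter]
    congr 1
    apply List.filter_congr
    intro c _
    by_cases hcj : c = j <;> simp [hcj, Bool.and_comm]

lemma toList_foldA (ps : List Char) : ∀ w : String,
    (ps.foldl (fun w j => PySem.Str.lower (PySem.Str.replace w (String.ofList [j]) "")) w).toList
      = pvListFold ps w.toList := by
  induction ps with
  | nil => intro w; simp [pvListFold]
  | cons j t ih =>
    intro w
    simp only [pvListFold] at ih ⊢
    rw [List.foldl_cons, List.foldl_cons, ih]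
    have hstep : (PySem.Str.lower (PySem.Str.replace w (String.ofList [j]) "")).toList
        = PySem.Chars.lower (List.filter (fun c => !(c == j)) w.toList) := by
      simp [PySem.Str.toList_lower, PySem.Str.toList_replace, replace_single]
    rw [hstep]

lemma pvPunctA_nonalpha : ∀ j ∈ pvPunctA, PySem.Chars.isalpha j = false := by
  intro j hj
  fin_cases hj <;> decide

lemma pvPunctA_ne : pvPunctA ≠ [] := by unfold pvPunctA; simp

lemma mem_punct_iff (c : Char) : c ∈ pvPunctA ↔ pvIsPunct c = true := by
  constructor
  · intro h; fin_cases h <;> decide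
  · intro h
    simp only [pvIsPunct, Bool.or_eq_true, Bool.and_eq_true, decide_eq_true_eq] at h
    rw [← Char.ofNat_toNat c]
    have h1 : 33 ≤ c.toNat := by omega
    have h2 : c.toNat ≤ 126 := by omega
    interval_cases h' : c.toNat <;> first | decide | omega

lemma pvClean_eq (l : List Char) :
    pvClean l = PySem.Chars.lower (l.filter (fun c => !pvPunctA.contains c)) := by
  induction l with
  | nil => simp [pvClean, PySem.Chars.lower]
  | cons c t ih =>
    rw [pvClean, ih]
    by_cases hm : c ∈ pvPunctA
    · rw [if_pos ((mem_punct_iff c).mp hm)]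
      simp [hm]
    · have hp : pvIsPunct c = false := by
        rw [← Bool.not_eq_true]; exact fun h => hm ((mem_punct_iff c).mpr h)
      rw [if_neg (by simp [hp])]
      simp [hm, PySem.Chars.lower]

lemma isalpha_lowerChar (c : Char) :
    PySem.Chars.isalpha (PySem.Chars.lowerChar c)
      = ((decide ('a' ≤ PySem.Chars.lowerChar c) && decide (PySem.Chars.lowerChar c ≤ 'z'))) := by
  by_cases hu : PySem.Chars.isupper c = true
  · have hlow := islower_lowerChar_of_upper c hu
    have hnu : PySem.Chars.isupper (PySem.Chars.lowerChar c) = false := by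
      obtain ⟨_, _, h3⟩ := lowerChar_of_upper c hu
      simp only [PySem.Chars.isupper, Bool.and_eq_false_iff, decide_eq_false_iff_not]
      right
      rw [toNat_le_iff]
      have hZ : ('Z' : Char).toNat = 90 := by decide
      omega
    simp only [PySem.Chars.isalpha, hnu, Bool.false_or]
    simp only [PySem.Chars.islower]
  · have hc : PySem.Chars.lowerChar c = c := by simp [PySem.Chars.lowerChar, hu]
    rw [hc]
    simp only [PySem.Chars.isalpha, Bool.not_eq_true] at *
    simp [hu, PySem.Chars.islower]

lemma hasLetter_lower (l : List Char) :
    pvHasLetter (PySem.Chars.lower l) = (PySem.Chars.lower l).any (fun ch => PySem.Chars.isalpha ch) := by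
  induction l with
  | nil => simp [pvHasLetter, PySem.Chars.lower]
  | cons c t ih =>
    simp only [PySem.Chars.lower, List.map_cons, List.any_cons] at ih ⊢
    rw [pvHasLetter, ih, isalpha_lowerChar]

-- per-word agreement: A's 32-replace fold = B's one-pass clean
lemma word_eq (w : String) :
    pvPunctA.foldl (fun w j => PySem.Str.lower (PySem.Str.replace w (String.ofList [j]) "")) w
      = String.ofList (pvClean w.toList) := by
  apply String.toList_inj.mp
  rw [toList_foldA]
  rw [pvListFold_eq pvPunctA pvPunctA_ne pvPunctA_nonalpha]
  rw [pvClean_eq]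
  simp

lemma build_eq (ws : List String) :
    (ws.map (fun w =>
        pvPunctA.foldl (fun w j => PySem.Str.lower (PySem.Str.replace w (String.ofList [j]) "")) w)).filter
      (fun w => w.toList.any (fun ch => PySem.Chars.isalpha ch))
      = pvBuild ws := by
  induction ws with
  | nil => simp [pvBuild]
  | cons w t ih =>
    rw [List.map_cons, List.filter_cons, word_eq, pvBuild, ih]
    have htl : (String.ofList (pvClean w.toList)).toList = pvClean w.toList := by simp
    rw [htl]
    have h2 : pvHasLetter (pvClean w.toList) = (pvClean w.toList).any (fun ch => PySem.Chars.isalpha ch) := by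
      rw [pvClean_eq]; exact hasLetter_lower _
    rw [h2]

-- ===== VERDICT (by name: the statement is the Claim_ definition above) =====
theorem split_punctuation_spec : Claim_equal_split_punctuation := by
  intro s _
  show split_punctuation s = split_punctuation_alt s
  unfold split_punctuation split_punctuation_alt
  simp only []
  exact build_eq _
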